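-- pv_equiv track=rewrite | github.com/wslh-bio/dryad | fun_lib.py | cpu_count
-- ===== SOURCE A (Python) =====
-- def cpu_count(num):
--     if num <=1:
--         return 1,1
--     elif num <= 5:
--         return 1,num
--     else:
--         results = []
--         for n in range(2,num):
--             if num % n == 0:
--                 results.append(n)
--         if len(results) < 2:
--             return cpu_count(num-1)
--         index = int(len(results)/2)
--         return results[index],int(num/results[index])
-- ===== SOURCE B (Python) =====
-- def cpu_count(num):
--     if num <= 1:
--         return 1, 1
--     if num <= 5:
--         return 1, num
--     small = []
--     large = []
--     d = 2
--     while d * d <= num: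
--         if num % d == 0:
--             small.append(d)
--             q = num // d
--             if q != d:
--                 large.append(q)
--         d += 1
--     divs = small + large[::-1]
--     if len(divs) < 2:
--         return cpu_count(num - 1)
--     m = divs[len(divs) // 2]
--     return m, num // m
-- ===== Notes on version B (the rewrite author's own statement) =====
-- stated objective: faster
-- what changed: B enumerates divisor pairs (d, num//d) only up to sqrt(num) with a while-loop and stitches the ascending divisor list from the small half plus the reversed large half, instead of A's trial scan over the whole range(2, num).
import Mathlib
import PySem

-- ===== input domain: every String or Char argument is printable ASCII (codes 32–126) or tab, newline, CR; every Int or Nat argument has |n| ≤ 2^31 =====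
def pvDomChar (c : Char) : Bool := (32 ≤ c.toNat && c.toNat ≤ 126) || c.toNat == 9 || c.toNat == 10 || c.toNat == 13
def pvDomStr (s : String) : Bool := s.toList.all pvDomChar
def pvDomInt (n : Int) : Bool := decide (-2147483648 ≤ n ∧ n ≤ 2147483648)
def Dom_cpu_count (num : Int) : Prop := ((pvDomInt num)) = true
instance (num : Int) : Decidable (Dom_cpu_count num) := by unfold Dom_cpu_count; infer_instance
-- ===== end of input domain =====

-- B replaces A's trial scan over the whole range(2, num) by a divisor-pair loop bounded by sqrt(num); return-value equivalence (neither version mutates anything).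

-- ===== PORT A =====
-- num % n: Python % with divisor n ≥ 2 > 0 equals Int.emod (exact here);
-- int(num/results[index]): results[index] divides num and both are positive, so == Int division (exact);
-- results[index]: index = len/2 < len in this branch, so getD is exact.
def cpu_count (num : Int) : List Int :=
  if _h1 : num ≤ 1 then [1, 1]
  else if _h2 : num ≤ 5 then [1, num]
  else
    let results := (PySem.List.pyRange 2 num 1).foldl
      (fun acc n => if num % n == 0 then acc ++ [n] else acc) ([] : List Int)
    if results.length < 2 then cpu_count (num - 1)
    else
      let index := results.length / 2
      let m := results.getD index 0
      [m, num / m]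
termination_by num.toNat
decreasing_by omega

-- ===== PORT B =====
-- the while-loop of Source B: d runs while d*d <= num, collecting small divisors and their cofactors
-- (num % d and num // d with d ≥ 2 > 0 and num > 0: Python semantics == Int.emod / Int division, exact here)
def pvDivLoop (num d : Int) (small large : List Int) : List Int × List Int :=
  if _h : d * d ≤ num then
    if num % d == 0 then
      let q := num / d
      pvDivLoop num (d + 1) (small ++ [d]) (if q != d then large ++ [q] else large)
    else pvDivLoop num (d + 1) small large
  else (small, large)
termination_by (num + 1 - d).toNat
decreasing_by
  · have : d ≤ d * d := by nlinarith
    omega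
  · have : d ≤ d * d := by nlinarith
    omega

-- divs[len(divs)//2]: the index is < len in this branch, so getD is exact
def cpu_count_alt (num : Int) : List Int :=
  if _h1 : num ≤ 1 then [1, 1]
  else if _h2 : num ≤ 5 then [1, num]
  else
    let p := pvDivLoop num 2 [] []
    let divs := p.1 ++ p.2.reverse
    if divs.length < 2 then cpu_count_alt (num - 1)
    else
      let m := divs.getD (divs.length / 2) 0
      [m, num / m]
termination_by num.toNat
decreasing_by omega

-- ===== PRECONDITION & SPEC =====
def Spec_cpu_count (num : Int) (out : List Int) : Prop := out = cpu_count_alt num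
instance (num : Int) (out : List Int) : Decidable (Spec_cpu_count num out) := by unfold Spec_cpu_count; infer_instance

-- ===== CLAIM (what is proved, stated in full; the proofs are below) =====
def Claim_equal_cpu_count : Prop := ∀ (num : Int), Dom_cpu_count num → Spec_cpu_count num (cpu_count num)

-- ===== LEMMAS AND PROOFS =====

-- pure descriptions of the two halves pvDivLoop accumulates
def pvSmalls (num d : Int) : List Int :=
  if _h : d * d ≤ num then
    (if num % d = 0 then [d] else []) ++ pvSmalls num (d + 1)
  else []
termination_by (num + 1 - d).toNat
decreasing_by
  have : d ≤ d * d := by nlinarith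
  omega

def pvLarges (num d : Int) : List Int :=
  if _h : d * d ≤ num then
    (if num % d = 0 ∧ num / d ≠ d then [num / d] else []) ++ pvLarges num (d + 1)
  else []
termination_by (num + 1 - d).toNat
decreasing_by
  have : d ≤ d * d := by nlinarith
  omega

theorem pvSmalls_pos (num d : Int) (h : d * d ≤ num) (hm : num % d = 0) :
    pvSmalls num d = d :: pvSmalls num (d + 1) := by
  rw [pvSmalls, dif_pos h, if_pos hm]; rfl

theorem pvSmalls_neg (num d : Int) (h : d * d ≤ num) (hm : ¬ num % d = 0) :
    pvSmalls num d = pvSmalls num (d + 1) := by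
  rw [pvSmalls, dif_pos h, if_neg hm]; rfl

theorem pvLarges_pos (num d : Int) (h : d * d ≤ num) (hm : num % d = 0) (hq : num / d ≠ d) :
    pvLarges num d = num / d :: pvLarges num (d + 1) := by
  rw [pvLarges, dif_pos h, if_pos ⟨hm, hq⟩]; rfl

theorem pvLarges_neg (num d : Int) (h : d * d ≤ num) (hm : ¬ (num % d = 0 ∧ num / d ≠ d)) :
    pvLarges num d = pvLarges num (d + 1) := by
  rw [pvLarges, dif_pos h, if_neg hm]; rfl

theorem pvDivLoop_eq (num d : Int) (small large : List Int) :
    pvDivLoop num d small large = (small ++ pvSmalls num d, large ++ pvLarges num d) := by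
  fun_induction pvDivLoop num d small large with
  | case1 d small large h hmod q ih =>
      simp only [dite_eq_ite] at ih
      rw [ih]
      have hm : num % d = 0 := by simpa using hmod
      rw [pvSmalls_pos num d h hm]
      by_cases hq : q = d
      · rw [pvLarges_neg num d h (by simp [q] at hq; tauto)]
        simp [hq, q]
      · rw [pvLarges_pos num d h hm (by simpa [q] using hq)]
        simp [hq, q, bne_iff_ne]
  | case2 d small large h hmod ih =>
      have hm : ¬ num % d = 0 := by simpa using hmod
      rw [ih, pvSmalls_neg num d h hm, pvLarges_neg num d h (fun hc => hm hc.1)]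
  | case3 d small large h =>
      rw [pvSmalls, pvLarges, dif_neg h, dif_neg h]
      simp

theorem mem_pvSmalls (num : Int) : ∀ (d : Int), 2 ≤ d → ∀ n : Int,
    (n ∈ pvSmalls num d ↔ d ≤ n ∧ n * n ≤ num ∧ num % n = 0) := by
  intro d
  fun_induction pvSmalls num d with
  | case1 d h ih =>
      intro hd n
      have ih' := ih (by omega) n
      simp only [List.mem_append, ih']
      constructor
      · rintro (hhd | ⟨h1, h2, h3⟩)
        · by_cases hm : num % d = 0
          · simp [hm] at hhd; subst hhd; exact ⟨le_refl _, h, hm⟩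
          · simp [hm] at hhd
        · exact ⟨by omega, h2, h3⟩
      · rintro ⟨h1, h2, h3⟩
        rcases eq_or_lt_of_le h1 with heq | hlt
        · subst heq; left; simp [h3]
        · right; exact ⟨by omega, h2, h3⟩
  | case2 d h =>
      intro hd n
      simp only [List.not_mem_nil, false_iff]
      rintro ⟨h1, h2, _⟩
      have : d * d ≤ n * n := by nlinarith
      omega

theorem pvDivMul (num e : Int) (h : num % e = 0) : num / e * e = num :=
  Int.ediv_mul_cancel (Int.dvd_of_emod_eq_zero h)

theorem pvDivPos (num e : Int) (he : 0 < e) (hnum : 0 < num) (h : num % e = 0) :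
    0 < num / e := by
  have h2 := pvDivMul num e h
  nlinarith

theorem pvDivAnti (num d e : Int) (hd : 0 < d) (hde : d < e) (hnum : 0 < num)
    (hmd : num % d = 0) (hme : num % e = 0) : num / e < num / d := by
  have h1 := pvDivMul num d hmd
  have h2 := pvDivMul num e hme
  have hqe : 0 < num / e := pvDivPos num e (by omega) hnum hme
  by_contra hle
  push Not at hle
  nlinarith

theorem pvDivGe (num e : Int) (he : 0 < e) (hee : e * e ≤ num) (h : num % e = 0) :
    e ≤ num / e := by
  have h2 := pvDivMul num e h
  nlinarith

theorem mem_pvLarges (num : Int) : ∀ (d : Int), 2 ≤ d → ∀ n : Int,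
    (n ∈ pvLarges num d ↔
      ∃ e, d ≤ e ∧ e * e ≤ num ∧ num % e = 0 ∧ num / e ≠ e ∧ n = num / e) := by
  intro d
  fun_induction pvLarges num d with
  | case1 d h ih =>
      intro hd n
      have ih' := ih (by omega) n
      simp only [List.mem_append, ih']
      constructor
      · rintro (hhd | ⟨e, h1, h2, h3, h4, h5⟩)
        · by_cases hm : num % d = 0 ∧ num / d ≠ d
          · rw [if_pos hm] at hhd
            simp at hhd
            exact ⟨d, le_refl _, h, hm.1, hm.2, hhd⟩
          · rw [if_neg hm] at hhd
            exact absurd hhd (List.not_mem_nil)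
        · exact ⟨e, by omega, h2, h3, h4, h5⟩
      · rintro ⟨e, h1, h2, h3, h4, h5⟩
        rcases eq_or_lt_of_le h1 with heq | hlt
        · subst heq; left; simp [h3, h4, h5]
        · right; exact ⟨e, by omega, h2, h3, h4, h5⟩
  | case2 d h =>
      intro hd n
      simp only [List.not_mem_nil, false_iff]
      rintro ⟨e, h1, h2, _⟩
      have : d * d ≤ e * e := by nlinarith
      omega

theorem pairwise_pvSmalls (num : Int) : ∀ (d : Int), 2 ≤ d →
    (pvSmalls num d).Pairwise (· < ·) := by
  intro d
  fun_induction pvSmalls num d with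
  | case1 d h ih =>
      intro hd
      refine List.pairwise_append.2 ⟨?_, ih (by omega), ?_⟩
      · split <;> simp
      · intro a ha b hb
        have hb' := (mem_pvSmalls num (d + 1) (by omega) b).1 hb
        split at ha <;> simp at ha
        omega
  | case2 d h =>
      intro hd; simp

theorem pairwise_pvLarges (num : Int) : ∀ (d : Int), 2 ≤ d →
    (pvLarges num d).Pairwise (· > ·) := by
  intro d
  fun_induction pvLarges num d with
  | case1 d h ih =>
      intro hd
      refine List.pairwise_append.2 ⟨?_, ih (by omega), ?_⟩
      · split <;> simp
      · intro a ha b hb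
        obtain ⟨e, he1, he2, he3, _, he5⟩ := (mem_pvLarges num (d + 1) (by omega) b).1 hb
        by_cases hm : num % d = 0 ∧ num / d ≠ d
        · rw [if_pos hm] at ha
          simp at ha
          subst ha he5
          exact pvDivAnti num d e (by omega) (by omega) (by nlinarith) hm.1 he3
        · rw [if_neg hm] at ha
          exact absurd ha (List.not_mem_nil)
  | case2 d h =>
      intro hd; simp

theorem pvSmall_lt_pvLarge (num m n : Int) (hm2 : 2 ≤ m) (hmm : m * m ≤ num)
    (e : Int) (he2 : 2 ≤ e) (hee : e * e ≤ num) (hme : num % e = 0)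
    (hne : num / e ≠ e) (hn : n = num / e) : m < n := by
  have h2 := pvDivMul num e hme
  have hge := pvDivGe num e (by omega) hee hme
  have hgt : e < n := by omega
  by_contra hle
  push Not at hle
  nlinarith

theorem pvSortedEq : ∀ (l1 l2 : List Int), l1.Pairwise (· < ·) → l2.Pairwise (· < ·) →
    (∀ n, n ∈ l1 ↔ n ∈ l2) → l1 = l2 := by
  intro l1 l2 h1 h2 hmem
  have nd1 : l1.Nodup := h1.imp ne_of_lt
  have nd2 : l2.Nodup := h2.imp ne_of_lt
  have hp : l1.Perm l2 := (List.perm_ext_iff_of_nodup nd1 nd2).2 hmem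
  exact hp.eq_of_pairwise (fun a b _ _ ha hb => absurd (lt_trans ha hb) (lt_irrefl a)) h1 h2

theorem pvDivs_eq_filter (num : Int) (h : 6 ≤ num) :
    pvSmalls num 2 ++ (pvLarges num 2).reverse
      = (PySem.List.pyRange 2 num 1).filter (fun n => num % n == 0) := by
  apply pvSortedEq
  · refine List.pairwise_append.2 ⟨pairwise_pvSmalls num 2 le_rfl, ?_, ?_⟩
    · rw [List.pairwise_reverse]
      exact pairwise_pvLarges num 2 le_rfl
    · intro a ha b hb
      rw [List.mem_reverse] at hb
      obtain ⟨h1, h2, h3⟩ := (mem_pvSmalls num 2 le_rfl a).1 ha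
      obtain ⟨e, he1, he2, he3, he4, he5⟩ := (mem_pvLarges num 2 le_rfl b).1 hb
      exact pvSmall_lt_pvLarge num a b h1 h2 e he1 he2 he3 he4 he5
  · exact (PySem.List.pairwise_lt_pyRange_one 2 num).filter _
  · intro n
    simp only [List.mem_append, List.mem_reverse, List.mem_filter,
      PySem.List.mem_pyRange_one, mem_pvSmalls num 2 le_rfl n, mem_pvLarges num 2 le_rfl n,
      beq_iff_eq]
    constructor
    · rintro (⟨h1, h2, h3⟩ | ⟨e, he1, he2, he3, he4, he5⟩)
      · exact ⟨⟨h1, by nlinarith⟩, h3⟩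
      · have hmul := pvDivMul num e he3
        have hge := pvDivGe num e (by omega) he2 he3
        have hgt : e < n := by omega
        have hn2 : 2 ≤ n := by omega
        refine ⟨⟨hn2, by nlinarith⟩, ?_⟩
        exact Int.emod_eq_zero_of_dvd ⟨e, by nlinarith⟩
    · rintro ⟨⟨h1, h2⟩, h3⟩
      by_cases hs : n * n ≤ num
      · exact Or.inl ⟨h1, hs, h3⟩
      · right
        push Not at hs
        have hmul := pvDivMul num n h3
        have hnpos : 0 < n := by omega
        have hepos : 0 < num / n := pvDivPos num n hnpos (by omega) h3
        have hene : num / n ≠ 1 := by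
          intro h1'
          rw [h1'] at hmul
          omega
        have he2 : 2 ≤ num / n := by omega
        have hee : num / n * (num / n) ≤ num := by nlinarith
        have hme : num % (num / n) = 0 :=
          Int.emod_eq_zero_of_dvd ⟨n, by omega⟩
        have hdiv : num / (num / n) = n := by
          have hne0 : num / n ≠ 0 := by omega
          calc num / (num / n) = (num / n * n) / (num / n) := by rw [hmul]
            _ = n := Int.mul_ediv_cancel_left n hne0
        refine ⟨num / n, he2, hee, hme, ?_, hdiv.symm⟩
        rw [hdiv]
        nlinarith

theorem pvKey (num : Int) (h : 6 ≤ num) :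
    (pvDivLoop num 2 [] []).1 ++ (pvDivLoop num 2 [] []).2.reverse
      = (PySem.List.pyRange 2 num 1).foldl
          (fun acc n => if num % n == 0 then acc ++ [n] else acc) ([] : List Int) := by
  rw [pvDivLoop_eq, PySem.List.foldl_append_if_eq_filter]
  simp only [List.nil_append]
  exact pvDivs_eq_filter num h

theorem cpu_count_eq (num : Int) : cpu_count num = cpu_count_alt num := by
  fun_induction cpu_count num with
  | case1 num h1 => rw [cpu_count_alt]; simp [h1]
  | case2 num h1 h2 => rw [cpu_count_alt]; simp [h1, h2]
  | case3 num h1 h2 results hcond ih =>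
      rw [cpu_count_alt, dif_neg h1, dif_neg h2]
      simp only
      rw [if_pos (by rw [pvKey num (by omega)]; exact hcond)]
      exact ih
  | case4 num h1 h2 results hcond =>
      rw [cpu_count_alt, dif_neg h1, dif_neg h2]
      simp only
      rw [if_neg (by rw [pvKey num (by omega)]; exact hcond)]
      rw [pvKey num (by omega)]
      rfl

-- ===== VERDICT (by name: the statement is the Claim_ definition above) =====
theorem cpu_count_spec : Claim_equal_cpu_count := by
  intro num _
  exact cpu_count_eq num
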